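-- pv_equiv track=rewrite | github.com/DragunWF/Competitive-Programming | CodeWars/python/6_kyu/throwing_darts.py | score_throws
-- ===== SOURCE A (Python) =====
-- def score_throws(radii: list[int]) -> int:
--     if not radii:
--         return 0
--     points = 0
--     all_radii_less_than_5 = True
--     for score in radii:
--         if 5 <= score <= 10:
--             points += 5
--             all_radii_less_than_5 = False
--         elif score < 5:
--             points += 10
--         else:
--             all_radii_less_than_5 = False
--     if all_radii_less_than_5:
--         points += 100
--     return points
-- ===== SOURCE B (Python) =====
-- def _count_less(s, x):
--     # binary search: number of elements < x in ascending-sorted s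
--     lo, hi = 0, len(s)
--     while lo < hi:
--         mid = (lo + hi) // 2
--         if s[mid] < x:
--             lo = mid + 1
--         else:
--             hi = mid
--     return lo
--
--
-- def score_throws(radii: list[int]) -> int:
--     if not radii:
--         return 0
--     s = sorted(radii)
--     inner = _count_less(s, 5)      # radii scoring 10
--     upto10 = _count_less(s, 11)    # radii scoring 10 or 5
--     points = 10 * inner + 5 * (upto10 - inner)
--     if s[-1] < 5:                  # max radius < 5 -> every dart in the inner band
--         points += 100
--     return points
-- ===== Notes on version B (the rewrite author's own statement) =====
-- stated objective: alternative
-- what changed: Instead of scoring each throw in one loop with a points accumulator and an all-less-than-5 flag, B sorts the radii once, locates the two band boundaries (5 and 11) by hand-written binary search to get band counts, computes points arithmetically from the counts, and awards the bonus by checking only the maximum (last sorted) element.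
import Mathlib
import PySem

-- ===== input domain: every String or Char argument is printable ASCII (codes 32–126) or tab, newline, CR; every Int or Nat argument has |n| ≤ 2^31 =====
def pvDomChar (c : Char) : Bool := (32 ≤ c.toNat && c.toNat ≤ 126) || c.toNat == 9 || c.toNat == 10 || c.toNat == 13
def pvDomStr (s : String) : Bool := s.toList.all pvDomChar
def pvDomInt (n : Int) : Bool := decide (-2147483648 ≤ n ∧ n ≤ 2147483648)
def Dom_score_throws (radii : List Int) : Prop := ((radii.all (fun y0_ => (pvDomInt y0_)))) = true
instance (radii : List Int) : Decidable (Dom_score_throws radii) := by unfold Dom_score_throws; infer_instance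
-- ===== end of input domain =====

-- B replaces A's single scoring loop (accumulator + flag) by sort, binary search for the
-- band boundaries, arithmetic on the band counts, and a max-element bonus test (objective: alternative).

-- ===== PORT A =====
def score_throws (radii : List Int) : Int :=
  if radii = [] then 0
  else
    let s := radii.foldl (fun (st : Int × Bool) score =>
      if 5 ≤ score ∧ score ≤ 10 then (st.1 + 5, false)
      else if score < 5 then (st.1 + 10, st.2)
      else (st.1, false)) (0, true)
    if s.2 then s.1 + 100 else s.1

-- ===== PORT B =====
-- Source B's _count_less: the while loop as fuel recursion (each iteration strictly shrinks
-- hi - lo, so fuel (hi - lo).toNat = s.length at the call site is never exhausted);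
-- indices are always in range (0 ≤ lo ≤ mid < hi ≤ len), so pyGetD's default is never read.
def countLessGo (s : List Int) (x : Int) : Nat → Int → Int → Int
  | 0, lo, _hi => lo
  | Nat.succ n, lo, hi =>
    if lo < hi then
      let mid := PySem.Int.floordiv (lo + hi) 2
      if PySem.List.pyGetD s mid 0 < x then countLessGo s x n (mid + 1) hi
      else countLessGo s x n lo mid
    else lo

def countLess (s : List Int) (x : Int) : Int :=
  countLessGo s x s.length 0 (s.length : Int)

def score_throws_alt (radii : List Int) : Int :=
  if radii = [] then 0
  else
    let s := PySem.List.sorted radii (fun r => r) false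
    let inner := countLess s 5
    let upto10 := countLess s 11
    let points := 10 * inner + 5 * (upto10 - inner)
    -- s[-1]: s is nonempty, so pyGetD's default is never read
    if PySem.List.pyGetD s (-1) 0 < 5 then points + 100 else points

-- ===== PRECONDITION & SPEC =====
def Spec_score_throws (radii : List Int) (out : Int) : Prop := out = score_throws_alt radii
instance (radii : List Int) (out : Int) : Decidable (Spec_score_throws radii out) := by unfold Spec_score_throws; infer_instance

-- ===== CLAIM (what is proved, stated in full; the proofs are below) =====
def Claim_equal_score_throws : Prop := ∀ (radii : List Int), Dom_score_throws radii → Spec_score_throws radii (score_throws radii)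

-- ===== LEMMAS AND PROOFS =====

-- A's loop computes the band sum together with the all-below-5 flag.
theorem score_throws_foldl (l : List Int) (p : Int) (b : Bool) :
    l.foldl (fun (st : Int × Bool) score =>
      if 5 ≤ score ∧ score ≤ 10 then (st.1 + 5, false)
      else if score < 5 then (st.1 + 10, st.2)
      else (st.1, false)) (p, b)
    = (p + 10 * (l.countP (fun r => decide (r < 5)) : Int)
         + 5 * (l.countP (fun r => decide (5 ≤ r ∧ r ≤ 10)) : Int),
       b && l.all (fun r => decide (r < 5))) := by
  induction l generalizing p b with
  | nil => simp
  | cons x xs ih =>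
    simp only [List.foldl_cons, List.countP_cons, List.all_cons]
    by_cases h1 : 5 ≤ x ∧ x ≤ 10
    · have h5 : ¬ x < 5 := by omega
      simp [h1, h5, ih]
      ring
    · by_cases h2 : x < 5
      · have : ¬ (5 ≤ x ∧ x ≤ 10) := h1
        simp [h1, h2, ih]
        ring
      · have h10 : ¬ x ≤ 10 := by omega
        simp [h2, h10, ih]

-- the invariant of Source B's binary-search loop
theorem countLess_invariant (s : List Int) (x : Int) (hsort : s.Pairwise (· ≤ ·)) :
    ∀ (n : Nat) (lo hi : Int), (hi - lo).toNat ≤ n → 0 ≤ lo → hi ≤ (s.length : Int) → lo ≤ hi →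
    (∀ i : Nat, (i : Int) < lo → i < s.length → s.getD i 0 < x) →
    (∀ i : Nat, hi ≤ (i : Int) → i < s.length → ¬ s.getD i 0 < x) →
    lo ≤ countLessGo s x n lo hi ∧ countLessGo s x n lo hi ≤ hi ∧
      (∀ i : Nat, i < s.length → (s.getD i 0 < x ↔ (i : Int) < countLessGo s x n lo hi)) := by
  intro n
  induction n with
  | zero =>
    intro lo hi hfuel h0 hlen hle hL hR
    simp only [countLessGo]
    refine ⟨le_rfl, by omega, ?_⟩
    intro i hi'
    constructor
    · intro hx'
      by_contra hge
      exact hR i (by omega) hi' hx'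
    · intro hlt
      exact hL i hlt hi'
  | succ n ih =>
    intro lo hi hfuel h0 hlen hle hL hR
    simp only [countLessGo]
    by_cases h : lo < hi
    case neg =>
      simp only [if_neg h]
      refine ⟨le_rfl, by omega, ?_⟩
      intro i hi'
      constructor
      · intro hx'
        by_contra hge
        exact hR i (by omega) hi' hx'
      · intro hlt
        exact hL i hlt hi'
    case pos =>
      simp only [if_pos h]
      have hfd := PySem.Int.floordiv_eq_ediv_of_pos (a := lo + hi) (b := 2) (by norm_num)
      set mid := PySem.Int.floordiv (lo + hi) 2 with hmid
      have hb1 : lo ≤ mid := by omega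
      have hb2 : mid < hi := by omega
      have hmlen : mid.toNat < s.length := by omega
      have hmono : ∀ (i j : Nat), i < s.length → j < s.length → i ≤ j →
          s.getD i 0 ≤ s.getD j 0 := by
        intro i j hi2 hj hij
        rcases Nat.lt_or_ge i j with hlt | hge
        · rw [List.getD_eq_getElem s 0 hi2, List.getD_eq_getElem s 0 hj]
          exact List.pairwise_iff_getElem.mp hsort i j hi2 hj hlt
        · have : i = j := by omega
          subst this; exact le_rfl
      have hget : PySem.List.pyGetD s mid 0 = s.getD mid.toNat 0 := by
        rw [PySem.List.pyGetD_eq_getElem s (i := mid) 0 (by omega) (by omega), List.getD_eq_getElem s 0 hmlen]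
      by_cases hbv : PySem.List.pyGetD s mid 0 < x
      · simp only [if_pos hbv]
        have hx' : s.getD mid.toNat 0 < x := by rw [← hget]; exact hbv
        obtain ⟨ha', hb', hc'⟩ := ih (mid + 1) hi (by omega) (by omega) hlen (by omega)
          (by
            intro i hilt hiL
            have hmo := hmono i mid.toNat hiL hmlen (by omega)
            omega)
          hR
        exact ⟨by omega, hb', hc'⟩
      · simp only [if_neg hbv]
        rw [hget] at hbv
        obtain ⟨ha', hb', hc'⟩ := ih lo mid (by omega) h0 (by omega) (by omega) hL
          (by
            intro i hiM hiL
            have hmo := hmono mid.toNat i hmlen hiL (by omega)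
            omega)
        exact ⟨ha', by omega, hc'⟩

-- a pointwise cut position determines countP
theorem countP_of_cut (s : List Int) (x : Int) : ∀ (r : Int),
    0 ≤ r → r ≤ (s.length : Int) →
    (∀ i : Nat, i < s.length → (s.getD i 0 < x ↔ (i : Int) < r)) →
    (s.countP (fun a => decide (a < x)) : Int) = r := by
  induction s with
  | nil =>
    intro r h0 hlen _
    simp only [List.length_nil, Nat.cast_zero] at hlen
    simp only [List.countP_nil, Nat.cast_zero]
    omega
  | cons a t ih =>
    intro r h0 hlen hc
    have h0' := hc 0 (by simp)
    simp only [List.getD_cons_zero] at h0'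
    simp only [List.length_cons] at hlen
    push_cast at hlen
    by_cases hr : 0 < r
    · have ha : a < x := h0'.mpr (by exact_mod_cast hr)
      have ih' := ih (r - 1) (by omega) (by omega) ?ht
      · simp only [List.countP_cons, ha, decide_true, if_true]
        push_cast
        omega
      case ht =>
        intro i hi
        have hc' := hc (i + 1) (by simp only [List.length_cons]; omega)
        simp only [List.getD_cons_succ] at hc'
        rw [hc']
        push_cast
        omega
    · have ha : ¬ a < x := fun hax => by have := h0'.mp hax; omega
      have ih' := ih 0 le_rfl (by positivity) ?ht0
      · simp only [List.countP_cons, ha, decide_false]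
        push_cast at ih' ⊢
        omega
      case ht0 =>
        intro i hi
        have hc' := hc (i + 1) (by simp only [List.length_cons]; omega)
        simp only [List.getD_cons_succ] at hc'
        rw [hc']
        push_cast
        omega

theorem countLess_eq (s : List Int) (x : Int) (hsort : s.Pairwise (· ≤ ·)) :
    countLess s x = (s.countP (fun a => decide (a < x)) : Int) := by
  unfold countLess
  have h := countLess_invariant s x hsort s.length 0 (s.length : Int)
    (by omega) le_rfl le_rfl (by positivity)
    (by intro i hi _; omega) (by intro i hi hlen; omega)
  exact (countP_of_cut s x _ h.1 h.2.1 h.2.2).symm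

-- in an ascending list every element is bounded by the last one
theorem le_getLast_of_pairwise (l : List Int) (hs : l.Pairwise (· ≤ ·)) (hne : l ≠ [])
    (x : Int) (hx : x ∈ l) : x ≤ l.getLast hne := by
  obtain ⟨i, hi, rfl⟩ := List.mem_iff_getElem.mp hx
  rw [List.getLast_eq_getElem]
  rcases Nat.lt_or_ge i (l.length - 1) with hlt | hge
  · exact List.pairwise_iff_getElem.mp hs i (l.length - 1) hi (by omega) hlt
  · have hieq : i = l.length - 1 := by
      have := l.length_pos_iff.mpr hne
      omega
    subst hieq
    exact le_rfl

-- the two low-band counts add up to the count below 11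
theorem countP_split (l : List Int) :
    l.countP (fun r => decide (r < 11)) =
      l.countP (fun r => decide (r < 5)) + l.countP (fun r => decide (5 ≤ r ∧ r ≤ 10)) := by
  induction l with
  | nil => simp
  | cons x xs ih =>
    simp only [List.countP_cons, ih]
    by_cases h1 : x < 5 <;> by_cases h2 : x < 11 <;>
      simp [h1, h2, show (5 ≤ x ∧ x ≤ 10) ↔ (¬ x < 5 ∧ x < 11) by omega] <;> omega

-- ===== VERDICT (by name: the statement is the Claim_ definition above) =====
theorem score_throws_spec : Claim_equal_score_throws := by
  intro radii _
  unfold Spec_score_throws score_throws score_throws_alt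
  by_cases h : radii = []
  · simp [h]
  · simp only [if_neg h, score_throws_foldl, Bool.true_and, zero_add]
    set s := PySem.List.sorted radii (fun r => r) false with hs
    have hperm : s.Perm radii := PySem.List.sorted_perm radii _ _
    have hsort : s.Pairwise (· ≤ ·) := by
      simpa using PySem.List.sorted_pairwise radii (fun r => r) (κ := Int)
    have hne : s ≠ [] := by
      intro hnil; exact h ((hnil ▸ hperm).symm.eq_nil)
    have c5 := countLess_eq s 5 hsort
    have c11 := countLess_eq s 11 hsort
    have hcnt5 : s.countP (fun r => decide (r < 5)) = radii.countP (fun r => decide (r < 5)) :=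
      hperm.countP_eq _
    have hcnt11 : s.countP (fun r => decide (r < 11)) = radii.countP (fun r => decide (r < 11)) :=
      hperm.countP_eq _
    have hcntm : s.countP (fun r => decide (5 ≤ r ∧ r ≤ 10))
        = radii.countP (fun r => decide (5 ≤ r ∧ r ≤ 10)) := hperm.countP_eq _
    -- bonus: last element of the sorted list is below 5 iff all radii are
    have hlast : PySem.List.pyGetD s (-1) 0 = s.getLast hne :=
      PySem.List.pyGetD_neg_one s 0 hne
    have hbonus : (radii.all (fun r => decide (r < 5)) = true) ↔ PySem.List.pyGetD s (-1) 0 < 5 := by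
      rw [hlast]
      constructor
      · intro hall
        have hmem : s.getLast hne ∈ radii := hperm.mem_iff.mp (List.getLast_mem hne)
        simpa using List.all_eq_true.mp hall _ hmem
      · intro hl
        rw [List.all_eq_true]
        intro r hr
        have hrs : r ∈ s := hperm.mem_iff.mpr hr
        have := le_getLast_of_pairwise s hsort hne r hrs
        simp only [decide_eq_true_eq]
        omega
    have hpts : 10 * countLess s 5 + 5 * (countLess s 11 - countLess s 5)
        = 10 * (radii.countP (fun r => decide (r < 5)) : Int)
          + 5 * (radii.countP (fun r => decide (5 ≤ r ∧ r ≤ 10)) : Int) := by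
      rw [c5, c11, hcnt5, hcnt11, countP_split]
      push_cast
      ring
    by_cases hb : PySem.List.pyGetD s (-1) 0 < 5
    · have hall : radii.all (fun r => decide (r < 5)) = true := hbonus.mpr hb
      simp only [hall, if_true, if_pos hb]
      omega
    · have hall : radii.all (fun r => decide (r < 5)) = false := by
        rcases Bool.eq_false_or_eq_true (radii.all (fun r => decide (r < 5))) with h' | h'
        · exact absurd (hbonus.mp h') hb
        · exact h' 
      simp only [hall, Bool.false_eq_true, if_false, if_neg hb]
      omega
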